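-- pv_equiv track=rewrite | github.com/MaykolLuisMa/SearchEngine | Boolean_Model/src/model.py | search
-- ===== SOURCE A (Python) =====
-- def search(query,corpus):
--     docs = {id:[doc,True] for id, doc in corpus}
--     if len(query) == 0:
--         return []
--     for id in query:
--         for key in docs.keys():
--             if id not in [k for k,_ in docs[key][0]]:
--                 docs[key][1] = False
--     return [k for k,(l,b) in list(docs.items()) if b == True]
-- ===== SOURCE B (Python) =====
-- def search(query, corpus):
--     docs = {id: doc for id, doc in corpus}
--     if len(query) == 0:
--         return []
--     index = {}
--     for id, doc in docs.items():
--         for k, _ in doc: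
--             index.setdefault(k, set()).add(id)
--     matched = set(index.get(query[0], set()))
--     for term in query[1:]:
--         matched &= index.get(term, set())
--     return [id for id in docs if id in matched]
-- ===== Notes on version B (the rewrite author's own statement) =====
-- stated objective: faster
-- what changed: Replaces A's per-term rescan of every document's key list with a plain id->doc dict plus an inverted index term->set(ids) built in one pass; the result is the intersection of the query terms' posting sets, emitted in corpus insertion order.
import Mathlib
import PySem

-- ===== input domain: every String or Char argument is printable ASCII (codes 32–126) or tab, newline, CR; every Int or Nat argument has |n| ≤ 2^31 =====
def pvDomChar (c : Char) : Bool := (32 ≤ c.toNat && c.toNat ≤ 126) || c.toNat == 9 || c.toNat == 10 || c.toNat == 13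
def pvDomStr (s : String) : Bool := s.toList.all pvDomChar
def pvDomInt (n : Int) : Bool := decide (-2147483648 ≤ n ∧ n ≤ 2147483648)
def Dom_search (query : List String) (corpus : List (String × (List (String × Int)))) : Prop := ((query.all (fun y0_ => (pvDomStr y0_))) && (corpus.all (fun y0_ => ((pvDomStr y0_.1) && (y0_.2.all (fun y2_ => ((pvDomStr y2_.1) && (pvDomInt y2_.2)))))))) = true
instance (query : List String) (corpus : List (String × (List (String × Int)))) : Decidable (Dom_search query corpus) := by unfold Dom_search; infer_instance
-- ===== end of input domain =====

-- B replaces A's per-query-term rescan of every document by an inverted index (term -> posting set)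
-- and intersects the query terms' posting sets; same return value, a different algorithm.

-- ===== PORT A =====
def search (query : List String) (corpus : List (String × (List (String × Int)))) : List String :=
  let docs : PySem.Dict String (List (String × Int) × Bool) :=
    corpus.foldl (fun d p => d.insert p.1 (p.2, true)) PySem.Dict.empty
  if query.length = 0 then []
  else
    let docs := query.foldl (fun d id =>
      d.keys.foldl (fun d' key =>
        if (((d'.getD key ([], true)).1.map Prod.fst).contains id) = false then
          d'.modify key ([], true) (fun p => (p.1, false))
        else d') d) docs
    (docs.items.filter (fun p => p.2.2 == true)).map Prod.fst

-- ===== PORT B =====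
def search_alt (query : List String) (corpus : List (String × (List (String × Int)))) : List String :=
  let docs : PySem.Dict String (List (String × Int)) :=
    corpus.foldl (fun d p => d.insert p.1 p.2) PySem.Dict.empty
  match query with
  | [] => []
  | t :: ts =>
    let index : PySem.Dict String (PySem.Set String) :=
      docs.items.foldl (fun ix pr =>
        pr.2.foldl (fun ix2 kv => ix2.modify kv.1 PySem.Set.empty (fun s => PySem.Set.add s pr.1)) ix)
        PySem.Dict.empty
    let matched := ts.foldl (fun m term => PySem.Set.inter m (index.getD term PySem.Set.empty))
      (index.getD t PySem.Set.empty)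
    docs.keys.filter (fun id => PySem.Set.contains matched id)

-- ===== PRECONDITION & SPEC =====
def Spec_search (query : List String) (corpus : List (String × (List (String × Int)))) (out : List String) : Prop := out = search_alt query corpus
instance (query : List String) (corpus : List (String × (List (String × Int)))) (out : List String) : Decidable (Spec_search query corpus out) := by unfold Spec_search; infer_instance

-- ===== CLAIM (what is proved, stated in full; the proofs are below) =====
def Claim_equal_search : Prop := ∀ (query : List String) (corpus : List (String × (List (String × Int)))), Dom_search query corpus → Spec_search query corpus (search query corpus)

-- ===== LEMMAS AND PROOFS =====

lemma relAB (c : List (String × List (String × Int)))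
    (dA : PySem.Dict String (List (String × Int) × Bool)) (dB : PySem.Dict String (List (String × Int)))
    (h : ∀ k, dA.getD k ([], true) = (dB.getD k [], true)) :
    ∀ k, (c.foldl (fun d p => d.insert p.1 (p.2, true)) dA).getD k ([], true)
      = ((c.foldl (fun d p => d.insert p.1 p.2) dB).getD k [], true) := by
  induction c generalizing dA dB with
  | nil => exact h
  | cons p rest ih =>
    intro k
    refine ih _ _ (fun k' => ?_) k
    rw [PySem.Dict.getD_insert, PySem.Dict.getD_insert]
    split_ifs with hk
    · rfl
    · exact h k'

lemma innerA (id : String) (ks : List String) (d : PySem.Dict String (List (String × Int) × Bool))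
    (hks : ∀ x ∈ ks, x ∈ d.keys) :
    (ks.foldl (fun d' key => if (((d'.getD key ([], true)).1.map Prod.fst).contains id) = false then d'.modify key ([], true) (fun p => (p.1, false)) else d') d).keys = d.keys
    ∧ ∀ k, (ks.foldl (fun d' key => if (((d'.getD key ([], true)).1.map Prod.fst).contains id) = false then d'.modify key ([], true) (fun p => (p.1, false)) else d') d).getD k ([], true)
        = if k ∈ ks ∧ (((d.getD k ([], true)).1.map Prod.fst).contains id) = false
          then ((d.getD k ([], true)).1, false) else d.getD k ([], true) := by
  induction ks generalizing d with
  | nil => simp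
  | cons k0 rest ih =>
    set d1 := (if (((d.getD k0 ([], true)).1.map Prod.fst).contains id) = false then d.modify k0 ([], true) (fun p => (p.1, false)) else d) with hd1
    have hkeys1 : d1.keys = d.keys := by
      rw [hd1]; split_ifs with hc
      · rw [PySem.Dict.keys_modify, PySem.Dict.keys_insert_of_contains]
        exact (PySem.Dict.contains_iff_mem_keys _ _).2 (hks k0 (by simp))
      · rfl
    have hgd1 : ∀ k, d1.getD k ([], true)
        = if k = k0 ∧ (((d.getD k0 ([], true)).1.map Prod.fst).contains id) = false
          then ((d.getD k0 ([], true)).1, false) else d.getD k ([], true) := by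
      intro k
      rw [hd1]; split_ifs with hc h2 h3
      · rw [PySem.Dict.getD_modify]; simp [h2.1]
      · rw [PySem.Dict.getD_modify]
        rcases Decidable.em (k = k0) with hk | hk
        · exact absurd ⟨hk, hc⟩ h2
        · simp [hk]
      · exact absurd h3.2 hc
      · rfl
    obtain ⟨ihk, ihg⟩ := ih d1 (fun x hx => hkeys1 ▸ hks x (by simp [hx]))
    constructor
    · simpa [hkeys1] using ihk
    · intro k
      rw [List.foldl_cons, ← hd1, ihg k, hgd1 k]
      clear ihg ihk hgd1 hkeys1 hks ih hd1
      by_cases hk : k = k0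
      · subst hk
        cases hC : (List.map Prod.fst (d.getD k ([], true)).1).contains id <;>
          by_cases hr : k ∈ rest <;> simp [hr] <;> simp_all
      · cases hC : (List.map Prod.fst (d.getD k ([], true)).1).contains id <;>
          by_cases hr : k ∈ rest <;> simp [hr, hk] <;> simp_all

lemma outerA (q : List String) (d : PySem.Dict String (List (String × Int) × Bool)) :
    (q.foldl (fun d id => d.keys.foldl (fun d' key => if (((d'.getD key ([], true)).1.map Prod.fst).contains id) = false then d'.modify key ([], true) (fun p => (p.1, false)) else d') d) d).keys = d.keys
    ∧ ∀ k ∈ d.keys, (q.foldl (fun d id => d.keys.foldl (fun d' key => if (((d'.getD key ([], true)).1.map Prod.fst).contains id) = false then d'.modify key ([], true) (fun p => (p.1, false)) else d') d) d).getD k ([], true)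
        = ((d.getD k ([], true)).1, (d.getD k ([], true)).2 && q.all (fun t => ((d.getD k ([], true)).1.map Prod.fst).contains t)) := by
  induction q generalizing d with
  | nil => simp
  | cons t ts ih =>
    obtain ⟨hik, hig⟩ := innerA t d.keys d (fun x hx => hx)
    obtain ⟨ohk, ohg⟩ := ih (d.keys.foldl (fun d' key => if (((d'.getD key ([], true)).1.map Prod.fst).contains t) = false then d'.modify key ([], true) (fun p => (p.1, false)) else d') d)
    constructor
    · rw [List.foldl_cons, ohk, hik]
    · intro k hk
      rw [List.foldl_cons, ohg k (by rw [hik]; exact hk), hig k]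
      clear ohg hig ih ohk hik
      cases hC : (((d.getD k ([], true)).1.map Prod.fst).contains t) <;> simp [hk] <;> simp_all

lemma innerIx (doc : List (String × Int)) (name term id : String) (ix : PySem.Dict String (PySem.Set String)) :
    id ∈ (doc.foldl (fun ix2 kv => ix2.modify kv.1 PySem.Set.empty (fun s => PySem.Set.add s name)) ix).getD term PySem.Set.empty
    ↔ id ∈ ix.getD term PySem.Set.empty ∨ (term ∈ doc.map Prod.fst ∧ id = name) := by
  induction doc generalizing ix with
  | nil => simp
  | cons kv ds ih =>
    rw [List.foldl_cons, ih]
    rw [PySem.Dict.getD_modify]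
    by_cases hk : term = kv.1
    · simp [hk, PySem.Set.mem_add]; tauto
    · simp [hk]

lemma outerIx (items : List (String × List (String × Int))) (term id : String) (ix : PySem.Dict String (PySem.Set String)) :
    id ∈ (items.foldl (fun ix pr => pr.2.foldl (fun ix2 kv => ix2.modify kv.1 PySem.Set.empty (fun s => PySem.Set.add s pr.1)) ix) ix).getD term PySem.Set.empty
    ↔ id ∈ ix.getD term PySem.Set.empty ∨ ∃ pr ∈ items, pr.1 = id ∧ term ∈ pr.2.map Prod.fst := by
  induction items generalizing ix with
  | nil => simp
  | cons pr rest ih =>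
    rw [List.foldl_cons, ih, innerIx]
    simp; tauto

lemma interFold (ts : List String) (f : String → PySem.Set String) (m : PySem.Set String) (id : String) :
    id ∈ ts.foldl (fun m term => PySem.Set.inter m (f term)) m ↔ id ∈ m ∧ ∀ t ∈ ts, id ∈ f t := by
  induction ts generalizing m with
  | nil => simp
  | cons t rest ih =>
    rw [List.foldl_cons, ih]
    simp [PySem.Set.inter, List.mem_filter, PySem.Set.contains]
    tauto

lemma anyItems (d : PySem.Dict String (List (String × Int))) (hnd : d.keys.Nodup) (id : String)
    (hid : id ∈ d.keys) (P : List (String × Int) → Prop) :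
    (∃ pr ∈ d.items, pr.1 = id ∧ P pr.2) ↔ P (d.getD id []) := by
  constructor
  · rintro ⟨⟨k, v⟩, hm, h1, h2⟩
    cases h1
    rw [PySem.Dict.getD_of_get?_eq_some _ _ (PySem.Dict.get?_of_mem_items _ hm hnd)]
    exact h2
  · intro h
    have hc : d.contains id = true := (PySem.Dict.contains_iff_mem_keys _ _).2 hid
    rw [PySem.Dict.contains_eq_isSome_get?] at hc
    obtain ⟨v, hv⟩ := Option.isSome_iff_exists.1 hc
    refine ⟨(id, v), PySem.Dict.mem_items_of_get?_eq_some _ hv, rfl, ?_⟩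
    rwa [PySem.Dict.getD_of_get?_eq_some _ _ hv] at h

lemma keysAB (c : List (String × List (String × Int))) :
    (c.foldl (fun d p => d.insert p.1 (p.2, true)) (PySem.Dict.empty : PySem.Dict String (List (String × Int) × Bool))).keys
    = (c.foldl (fun d p => d.insert p.1 p.2) (PySem.Dict.empty : PySem.Dict String (List (String × Int)))).keys := by
  rw [PySem.Dict.keys_foldl_insert_key c Prod.fst (fun _ p => (p.2, true)),
      PySem.Dict.keys_foldl_insert_key c Prod.fst (fun _ p => p.2)]
  simp [PySem.Dict.keys_empty]

lemma nodupB (c : List (String × List (String × Int))) :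
    (c.foldl (fun d p => d.insert p.1 p.2) (PySem.Dict.empty : PySem.Dict String (List (String × Int)))).keys.Nodup := by
  exact PySem.Dict.nodup_keys_foldl_insert_key c Prod.fst (fun _ p => p.2) _ (by simp [PySem.Dict.keys_empty])

theorem main_eq (query : List String) (corpus : List (String × (List (String × Int)))) :
    search query corpus = search_alt query corpus := by
  cases query with
  | nil => simp [search, search_alt]
  | cons t ts =>
    simp only [search, search_alt]
    set docsA := corpus.foldl (fun d p => d.insert p.1 (p.2, true)) (PySem.Dict.empty : PySem.Dict String (List (String × Int) × Bool)) with hA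
    set docsB := corpus.foldl (fun d p => d.insert p.1 p.2) (PySem.Dict.empty : PySem.Dict String (List (String × Int))) with hB
    rw [if_neg (by simp)]
    have hrel : ∀ k, docsA.getD k ([], true) = (docsB.getD k [], true) :=
      relAB corpus PySem.Dict.empty PySem.Dict.empty (by simp [PySem.Dict.getD_empty])
    have hkeq : docsA.keys = docsB.keys := keysAB corpus
    have hnd : docsB.keys.Nodup := nodupB corpus
    obtain ⟨hok, hog⟩ := outerA (t :: ts) docsA
    set D := (t :: ts).foldl (fun d id => d.keys.foldl (fun d' key => if (((d'.getD key ([], true)).1.map Prod.fst).contains id) = false then d'.modify key ([], true) (fun p => (p.1, false)) else d') d) docsA with hD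
    rw [PySem.Dict.items_eq_map_keys D (by rw [hok, hkeq]; exact hnd) ([], true)]
    rw [List.filter_map, List.map_map, hok, hkeq]
    have hfst : (Prod.fst ∘ fun k => (k, D.getD k ([], true))) = id := rfl
    rw [hfst, List.map_id]
    refine List.filter_congr ?_
    intro id hid
    have hid' : id ∈ docsB.keys := hid
    have hpost : ∀ tm, id ∈ (docsB.items.foldl (fun ix pr => pr.2.foldl (fun ix2 kv => ix2.modify kv.1 PySem.Set.empty fun s => s.add pr.1) ix) PySem.Dict.empty).getD tm PySem.Set.empty ↔ tm ∈ (docsB.getD id []).map Prod.fst := by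
      intro tm
      rw [outerIx]
      rw [PySem.Dict.getD_empty]
      simp only [show (PySem.Set.empty : PySem.Set String) = [] from rfl, List.not_mem_nil, false_or]
      exact anyItems docsB hnd id hid' (fun doc => tm ∈ doc.map Prod.fst)
    have hmat : (List.foldl (fun m term => m.inter ((docsB.items.foldl (fun ix pr => pr.2.foldl (fun ix2 kv => ix2.modify kv.1 PySem.Set.empty fun s => s.add pr.1) ix) PySem.Dict.empty).getD term PySem.Set.empty)) ((docsB.items.foldl (fun ix pr => pr.2.foldl (fun ix2 kv => ix2.modify kv.1 PySem.Set.empty fun s => s.add pr.1) ix) PySem.Dict.empty).getD t PySem.Set.empty) ts).contains id = true ↔ ∀ tm ∈ t :: ts, tm ∈ (docsB.getD id []).map Prod.fst := by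
      show List.contains _ id = true ↔ _
      rw [List.contains_iff_mem, interFold]
      simp only [hpost, List.forall_mem_cons]
    simp only [Function.comp_apply]
    rw [hog id (by rw [hkeq]; exact hid), hrel id]
    rw [Bool.eq_iff_iff, hmat]
    simp [List.all_eq_true]


-- ===== VERDICT (by name: the statement is the Claim_ definition above) =====
theorem search_spec : Claim_equal_search := by
  intro query corpus _
  exact main_eq query corpus
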